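-- pv_equiv track=rewrite | github.com/meistro57/MeistroCraft | build_monitor.py | _extract_error_patterns
-- ===== SOURCE A (Python) =====
-- from typing import Dict, List, Any, Optional, Tuple
--
-- def _extract_error_patterns(logs: str) -> List[str]:
--     """Extract error patterns from build logs."""
--     if not logs:
--         return []
--
--     error_patterns = []
--     lines = logs.split('\n')
--
--     for line in lines:
--         line_lower = line.lower()
--         if any(keyword in line_lower for keyword in ['error:', 'failed:', 'exception:', 'fatal:']):
--             error_patterns.append(line.strip())
--
--     return error_patterns[-10:]  # Return last 10 error patterns
-- ===== SOURCE B (Python) =====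
-- def _extract_error_patterns(logs: str):
--     """Extract error patterns from build logs (backward scan with early exit)."""
--     if not logs:
--         return []
--
--     buf = []
--     for line in reversed(logs.split('\n')):
--         line_lower = line.lower()
--         if any(keyword in line_lower for keyword in ['error:', 'failed:', 'exception:', 'fatal:']):
--             buf.append(line.strip())
--             if len(buf) == 10:
--                 break
--     buf.reverse()
--     return buf
-- ===== Notes on version B (the rewrite author's own statement) =====
-- stated objective: alternative
-- what changed: B scans the lines back-to-front, collecting stripped matching lines into a bounded buffer and stopping as soon as 10 are found, then reverses the buffer, instead of A's forward pass that accumulates all matches and slices the last 10.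
import Mathlib
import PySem

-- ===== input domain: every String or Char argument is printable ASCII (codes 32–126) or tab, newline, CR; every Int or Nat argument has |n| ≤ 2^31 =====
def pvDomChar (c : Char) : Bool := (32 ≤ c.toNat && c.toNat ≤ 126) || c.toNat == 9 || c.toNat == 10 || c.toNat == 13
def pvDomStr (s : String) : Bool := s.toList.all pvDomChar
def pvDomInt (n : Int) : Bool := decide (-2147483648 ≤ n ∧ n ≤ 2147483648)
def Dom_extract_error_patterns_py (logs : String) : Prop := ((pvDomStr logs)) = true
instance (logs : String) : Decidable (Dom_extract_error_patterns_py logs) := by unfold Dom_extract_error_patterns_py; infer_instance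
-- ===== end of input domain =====

-- B scans the split lines back-to-front with a bounded 10-element buffer and early exit,
-- then reverses it, instead of A's forward accumulation followed by a [-10:] slice (alternative).


-- ===== PORT A =====
-- the per-line keyword test, shared by both Pythons verbatim:
-- any(keyword in line.lower() for keyword in ['error:', 'failed:', 'exception:', 'fatal:'])
def pvLineMatches (line : String) : Bool :=
  let line_lower := PySem.Str.lower line
  (["error:", "failed:", "exception:", "fatal:"] : List String).any
    (fun keyword => PySem.Str.isIn keyword line_lower)

def extract_error_patterns_py (logs : String) : List String :=
  if logs = "" then []
  else
    let lines := (PySem.Str.split? logs "\n").getD []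
    let error_patterns := lines.foldl
      (fun acc line => if pvLineMatches line then acc ++ [PySem.Str.strip line] else acc) []
    PySem.List.slice error_patterns (some (-10)) none

-- ===== PORT B =====
def pvAltGo : List String → List String → List String
  | [], buf => buf
  | line :: rest, buf =>
    if pvLineMatches line then
      let buf' := buf ++ [PySem.Str.strip line]
      if buf'.length = 10 then buf' else pvAltGo rest buf'
    else pvAltGo rest buf

def extract_error_patterns_py_alt (logs : String) : List String :=
  if logs = "" then []
  else (pvAltGo ((PySem.Str.split? logs "\n").getD []).reverse []).reverse

-- ===== PRECONDITION & SPEC =====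
def Spec_extract_error_patterns_py (logs : String) (out : List String) : Prop := out = extract_error_patterns_py_alt logs
instance (logs : String) (out : List String) : Decidable (Spec_extract_error_patterns_py logs out) := by unfold Spec_extract_error_patterns_py; infer_instance

-- ===== CLAIM (what is proved, stated in full; the proofs are below) =====
def Claim_equal_extract_error_patterns_py : Prop := ∀ (logs : String), Dom_extract_error_patterns_py logs → Spec_extract_error_patterns_py logs (extract_error_patterns_py logs)

-- ===== LEMMAS AND PROOFS =====

-- B's backward loop collects the first `10 - buf.length` stripped matches of its argument.
theorem pvAltGo_eq (ls : List String) : ∀ (buf : List String), buf.length < 10 →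
    pvAltGo ls buf = buf ++ ((ls.filter pvLineMatches).map PySem.Str.strip).take (10 - buf.length) := by
  induction ls with
  | nil => intro buf _; simp [pvAltGo]
  | cons line rest ih =>
    intro buf hlt
    by_cases hm : pvLineMatches line
    · simp only [pvAltGo, hm, if_true, List.filter_cons, List.map_cons]
      by_cases h10 : (buf ++ [PySem.Str.strip line]).length = 10
      · simp only [h10, if_true]
        have : 10 - buf.length = 1 := by simp at h10; omega
        simp [this]
      · simp only [h10, if_false]
        rw [ih _ (by simp at h10 ⊢; omega)]
        have : 10 - buf.length = (10 - (buf ++ [PySem.Str.strip line]).length) + 1 := by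
          simp at h10 ⊢; omega
        simp [this, List.take_succ_cons]
    · simp [pvAltGo, hm, ih buf hlt]

-- ===== VERDICT (by name: the statement is the Claim_ definition above) =====
theorem extract_error_patterns_py_spec : Claim_equal_extract_error_patterns_py := by
  intro logs _
  unfold Spec_extract_error_patterns_py extract_error_patterns_py extract_error_patterns_py_alt
  by_cases h : logs = ""
  · simp [h]
  · simp only [h, if_false]
    set lines := (PySem.Str.split? logs "\n").getD [] with hl
    rw [PySem.List.foldl_append_if pvLineMatches PySem.Str.strip,
        PySem.List.slice_from_neg_ofNat _ 10 (by omega),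
        pvAltGo_eq _ [] (by simp)]
    simp only [List.nil_append, List.length_nil, Nat.sub_zero, List.filter_reverse,
      List.map_reverse, List.take_reverse, List.reverse_reverse, List.length_map]
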